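-- pv_equiv track=rewrite | github.com/navneetsn18/Coursera-Algorithmic-Toolbox | Week 2/program 8.py | sumofn
-- ===== SOURCE A (Python) =====
-- def sumofn(n):
--     a=[]
--     b=[]
--     s=0
--     a.append(0)
--     b.append(0)
--     a.append(1)
--     b.append(1)
--     if(n<=0):
--         return b[0]
--     elif(n==1):
--         return b[1]
--     else:
--         for i in range(2,n+1):
--             a.append(a[i-1]+a[i-2])
--             b.append(a[i]**2)
--         s=sum(b)
--     return s
-- ===== SOURCE B (Python) =====
-- def sumofn(n):
--     # sum of F_i^2 for i=0..n equals F_n * F_{n+1}; compute F_n, F_{n+1} by fast doubling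
--     if n <= 0:
--         return 0
--
--     def fd(k):
--         # returns (F_k, F_{k+1})
--         if k == 0:
--             return (0, 1)
--         a, b = fd(k >> 1)
--         c = a * (2 * b - a)
--         d = a * a + b * b
--         if k & 1:
--             return (d, c + d)
--         return (c, d)
--
--     a, b = fd(n)
--     return a * b
-- ===== Notes on version B (the rewrite author's own statement) =====
-- stated objective: faster
-- what changed: Replaces the O(n) list-building loop and final sum with the identity sum F_i^2 = F_n*F_{n+1} computed by fast-doubling Fibonacci in O(log n) big-int operations.
import Mathlib
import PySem

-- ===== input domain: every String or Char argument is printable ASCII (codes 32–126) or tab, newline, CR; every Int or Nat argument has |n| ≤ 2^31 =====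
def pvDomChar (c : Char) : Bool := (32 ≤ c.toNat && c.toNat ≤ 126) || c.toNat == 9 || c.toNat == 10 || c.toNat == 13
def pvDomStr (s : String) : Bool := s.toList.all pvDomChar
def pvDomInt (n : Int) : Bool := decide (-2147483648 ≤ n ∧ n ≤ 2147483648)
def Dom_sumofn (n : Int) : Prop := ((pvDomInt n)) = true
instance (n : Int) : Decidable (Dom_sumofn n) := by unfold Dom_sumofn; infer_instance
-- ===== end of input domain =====

-- B replaces A's O(n) list-building loop by the identity Σ F_i² = F_n·F_{n+1} with fast-doubling Fibonacci (faster).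

-- ===== PORT A =====
-- Literal port of A: the loop appends a[i-1]+a[i-2] to a and a[i]^2 to b, then sums b.
-- All indices are always in range in the Python, so pyGetD _ _ 0 is exact here.
def sumofn (n : Int) : Int :=
  let a : List Int := [0, 1]
  let b : List Int := [0, 1]
  if n ≤ 0 then PySem.List.pyGetD b 0 0
  else if n = 1 then PySem.List.pyGetD b 1 0
  else
    let st := (PySem.List.pyRange 2 (n+1) 1).foldl
      (fun (st : List Int × List Int) i =>
        let ai := PySem.List.pyGetD st.1 (i-1) 0 + PySem.List.pyGetD st.1 (i-2) 0
        let a' := st.1 ++ [ai]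
        (a', st.2 ++ [(PySem.List.pyGetD a' i 0) ^ 2]))
      (a, b)
    st.2.sum

-- ===== PORT B =====
-- fd k = (F_k, F_{k+1}) by fast doubling (mirrors Source B's fd)
def pvFd (k : Nat) : Int × Int :=
  if h : k = 0 then (0, 1)
  else
    let p := pvFd (k / 2)
    let a := p.1
    let b := p.2
    let c := a * (2 * b - a)
    let d := a * a + b * b
    if k % 2 = 1 then (d, c + d) else (c, d)
decreasing_by exact Nat.div_lt_self (Nat.pos_of_ne_zero h) (by norm_num)

def sumofn_alt (n : Int) : Int :=
  if n ≤ 0 then 0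
  else
    let p := pvFd n.toNat
    p.1 * p.2

-- ===== PRECONDITION & SPEC =====
def Spec_sumofn (n : Int) (out : Int) : Prop := out = sumofn_alt n
instance (n : Int) (out : Int) : Decidable (Spec_sumofn n out) := by unfold Spec_sumofn; infer_instance

-- ===== CLAIM (what is proved, stated in full; the proofs are below) =====
def Claim_equal_sumofn : Prop := ∀ (n : Int), Dom_sumofn n → Spec_sumofn n (sumofn n)

-- ===== LEMMAS AND PROOFS =====

-- B side: pvFd computes the Fibonacci pair
theorem pvFd_eq (k : Nat) : pvFd k = ((Nat.fib k : Int), (Nat.fib (k+1) : Int)) := by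
  induction k using Nat.strong_induction_on with
  | _ k ih =>
    rw [pvFd]
    by_cases h : k = 0
    · simp [h]
    · rw [dif_neg h]
      have hlt : k / 2 < k := Nat.div_lt_self (Nat.pos_of_ne_zero h) (by norm_num)
      rw [ih _ hlt]
      simp only
      set m := k / 2 with hm
      have hfib2m : (Nat.fib (2*m) : Int) = (Nat.fib m : Int) * (2 * (Nat.fib (m+1) : Int) - (Nat.fib m : Int)) := by
        have hnat := Nat.fib_two_mul m
        have hle : Nat.fib m ≤ 2 * Nat.fib (m+1) :=
          le_trans (Nat.fib_le_fib_succ) (by omega)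
        have hc : (Nat.fib (2*m) : Int) = ((Nat.fib m * (2 * Nat.fib (m+1) - Nat.fib m) : Nat) : Int) := by
          exact_mod_cast hnat
        rw [hc, Nat.cast_mul, Int.natCast_sub hle]
        push_cast; ring
      have hfib2m1 : (Nat.fib (2*m+1) : Int) = (Nat.fib m : Int) * (Nat.fib m : Int) + (Nat.fib (m+1) : Int) * (Nat.fib (m+1) : Int) := by
        have hnat := Nat.fib_two_mul_add_one m
        have hc : (Nat.fib (2*m+1) : Int) = (((Nat.fib (m+1))^2 + (Nat.fib m)^2 : Nat) : Int) := by
          exact_mod_cast hnat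
        rw [hc]; push_cast; ring
      have h2 : (Nat.fib (2*m+2) : Int) = (Nat.fib (2*m) : Int) + (Nat.fib (2*m+1) : Int) := by
        exact_mod_cast Nat.fib_add_two (n := 2*m)
      by_cases hp : k % 2 = 1
      · have hk : k = 2*m + 1 := by omega
        rw [if_pos hp, hk]
        simp only [Prod.mk.injEq]
        refine ⟨hfib2m1.symm, ?_⟩
        rw [show (2*m+1+1) = 2*m+2 from rfl, h2, hfib2m, hfib2m1]
      · have hk : k = 2*m := by omega
        rw [if_neg hp, hk]
        simp only [Prod.mk.injEq]
        exact ⟨hfib2m.symm, hfib2m1.symm⟩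

-- A side: the loop invariant
def pvFibList (m : Nat) : List Int := (List.range (m+1)).map (fun j => (Nat.fib j : Int))

def pvStep : List Int × List Int → Int → List Int × List Int :=
  fun st i =>
    let ai := PySem.List.pyGetD st.1 (i-1) 0 + PySem.List.pyGetD st.1 (i-2) 0
    let a' := st.1 ++ [ai]
    (a', st.2 ++ [(PySem.List.pyGetD a' i 0) ^ 2])

theorem pvLoop_inv (m : Nat) (hm : 1 ≤ m) :
    ((PySem.List.pyRange 2 ((m:Int)+1) 1).foldl pvStep ([0,1],[0,1])).1 = pvFibList m ∧
    ((PySem.List.pyRange 2 ((m:Int)+1) 1).foldl pvStep ([0,1],[0,1])).2.sum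
      = (Nat.fib m : Int) * (Nat.fib (m+1) : Int) := by
  induction m with
  | zero => omega
  | succ m ih =>
    by_cases hm1 : m = 0
    · subst hm1
      rw [show ((1:Nat):Int)+1 = 2 by norm_num, PySem.List.pyRange_one_eq_nil (by norm_num)]
      constructor
      · simp [pvFibList, List.range_succ]
      · simp
    · have hm' : 1 ≤ m := by omega
      obtain ⟨ih1, ih2⟩ := ih hm'
      have hsplit : PySem.List.pyRange 2 ((m:Int)+1+1) 1
          = PySem.List.pyRange 2 ((m:Int)+1) 1 ++ [(m:Int)+1] := by
        exact PySem.List.pyRange_one_succ_right (by push_cast; omega)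
      push_cast
      rw [hsplit, List.foldl_append]
      set st := (PySem.List.pyRange 2 ((m:Int)+1) 1).foldl pvStep ([0,1],[0,1]) with hst
      simp only [List.foldl_cons, List.foldl_nil]
      have hlen : (pvFibList m).length = m + 1 := by simp [pvFibList]
      have hget : ∀ j : Nat, j < m + 1 → PySem.List.pyGetD (pvFibList m) ((j:Int)) 0 = (Nat.fib j : Int) := by
        intro j hj
        rw [PySem.List.pyGetD_natCast]
        simp [pvFibList, List.getD_eq_getElem?_getD, hj]
      have hai : PySem.List.pyGetD st.1 ((m:Int)+1-1) 0 + PySem.List.pyGetD st.1 ((m:Int)+1-2) 0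
          = (Nat.fib (m+1) : Int) := by
        rw [ih1]
        have e1 : (m:Int)+1-1 = ((m:Nat):Int) := by ring
        have e2 : (m:Int)+1-2 = (((m-1:Nat)):Int) := by omega
        rw [e1, e2, hget m (by omega), hget (m-1) (by omega)]
        have : Nat.fib (m+1) = Nat.fib m + Nat.fib (m-1) := by
          have hf := Nat.fib_add_two (n := m-1)
          have hm2 : m - 1 + 2 = m + 1 := by omega
          have hm3 : m - 1 + 1 = m := by omega
          rw [hm2, hm3] at hf
          omega
        rw [this]; push_cast; ring
      have ha' : st.1 ++ [(Nat.fib (m+1) : Int)] = pvFibList (m+1) := by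
        rw [ih1]
        simp [pvFibList, List.range_succ]
      have hlast : PySem.List.pyGetD (pvFibList (m+1)) ((m:Int)+1) 0 = (Nat.fib (m+1) : Int) := by
        have e : (m:Int)+1 = (((m+1:Nat)):Int) := by push_cast; ring
        rw [e, PySem.List.pyGetD_natCast]
        simp [pvFibList, List.getD_eq_getElem?_getD]
      constructor
      · simp only [pvStep, hai, ha']
      · simp only [pvStep, hai, ha', hlast]
        rw [List.sum_append, ih2]
        have hf : (Nat.fib (m+2) : Int) = (Nat.fib m : Int) + (Nat.fib (m+1) : Int) := by
          exact_mod_cast Nat.fib_add_two (n := m)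
        simp only [List.sum_cons, List.sum_nil]
        have : ((Nat.fib (m+1) : Int))^2 = (Nat.fib (m+1) : Int) * (Nat.fib (m+1) : Int) := by ring
        rw [this]
        nlinarith [hf]

-- ===== VERDICT (by name: the statement is the Claim_ definition above) =====
theorem sumofn_spec : Claim_equal_sumofn := by
  intro n _
  unfold Spec_sumofn sumofn sumofn_alt
  by_cases h0 : n ≤ 0
  · simp [h0, PySem.List.pyGetD]
  · have hpos : 0 < n := by omega
    rw [pvFd_eq]
    by_cases h1 : n = 1
    · subst h1
      norm_num [PySem.List.pyGetD, PySem.List.pyIdx?, PySem.List.pyGet?]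
    · have h2 : 2 ≤ n := by omega
      simp only [if_neg h0, if_neg h1]
      set m := n.toNat with hmdef
      have hn : (m : Int) = n := Int.toNat_of_nonneg (by omega)
      have hm1 : 1 ≤ m := by omega
      obtain ⟨_, hsum⟩ := pvLoop_inv m hm1
      rw [← hn]
      exact hsum
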